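-- pv_equiv track=rewrite | github.com/FelipeG2000/geo-event-analysis | utils.py | generate_date_ranges
-- ===== SOURCE A (Python) =====
-- def generate_date_ranges(start_year, end_year, frequency="quarterly"):
--     """
--     Generates date ranges based on the selected frequency.
--
--     :param start_year: Start year for the date range.
--     :param end_year: End year for the date range.
--     :param frequency: Frequency of the date ranges. Options: "monthly", "bimonthly", "quarterly", "four_months", "six_months".
--     :return: List of tuples with start and end dates.
--     """
--     frequencies = {
--         "monthly": [('-01-01', '-01-31'), ('-02-01', '-02-28'), ('-03-01', '-03-31'), ('-04-01', '-04-30'),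
--                     ('-05-01', '-05-31'), ('-06-01', '-06-30'), ('-07-01', '-07-31'), ('-08-01', '-08-31'),
--                     ('-09-01', '-09-30'), ('-10-01', '-10-31'), ('-11-01', '-11-30'), ('-12-01', '-12-31')],
--         "bimonthly": [('-01-01', '-02-28'), ('-03-01', '-04-30'), ('-05-01', '-06-30'), ('-07-01', '-08-31'),
--                       ('-09-01', '-10-31'), ('-11-01', '-12-31')],
--         "quarterly": [('-01-01', '-03-31'), ('-04-01', '-06-30'), ('-07-01', '-09-30'), ('-10-01', '-12-31')],
--         "four_months": [('-01-01', '-04-30'), ('-05-01', '-08-31'), ('-09-01', '-12-31')],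
--         "six_months": [('-01-01', '-06-30'), ('-07-01', '-12-31')]
--     }
--     return [(str(year) + start, str(year) + end) for year in range(start_year, end_year + 1) for start, end in
--             frequencies[frequency]]
-- ===== SOURCE B (Python) =====
-- def generate_date_ranges(start_year, end_year, frequency="quarterly"):
--     if end_year < start_year:
--         return []
--     step = {"monthly": 1, "bimonthly": 2, "quarterly": 3,
--             "four_months": 4, "six_months": 6}[frequency]
--     last_day = [31, 28, 31, 30, 31, 30, 31, 31, 30, 31, 30, 31]
--     result = []
--     for year in range(start_year, end_year + 1):
--         for i in range(0, 12, step):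
--             j = i + step - 1
--             result.append((f"{year}-{i + 1:02d}-01",
--                            f"{year}-{j + 1:02d}-{last_day[j]:02d}"))
--     return result
-- ===== Notes on version B (the rewrite author's own statement) =====
-- stated objective: simpler
-- what changed: B replaces the hardcoded five-entry table of date-suffix strings by arithmetic on month boundaries: a months-per-period count per frequency plus a 12-element last-day array, formatting each period's start/end with zero-padded month numbers (with an early [] return for an empty year range).
import Mathlib
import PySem

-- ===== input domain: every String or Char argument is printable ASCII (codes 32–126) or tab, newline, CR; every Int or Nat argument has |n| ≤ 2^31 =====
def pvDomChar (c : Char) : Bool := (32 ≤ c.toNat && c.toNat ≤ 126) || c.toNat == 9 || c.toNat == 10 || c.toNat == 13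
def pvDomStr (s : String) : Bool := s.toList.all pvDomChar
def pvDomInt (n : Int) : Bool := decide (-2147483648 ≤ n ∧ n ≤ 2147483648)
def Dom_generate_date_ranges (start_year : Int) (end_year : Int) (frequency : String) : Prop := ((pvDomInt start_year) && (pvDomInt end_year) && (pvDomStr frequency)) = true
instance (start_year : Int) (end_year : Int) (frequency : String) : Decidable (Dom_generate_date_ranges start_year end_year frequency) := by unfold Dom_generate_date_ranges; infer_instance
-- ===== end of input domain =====

-- B derives each range arithmetically from month boundaries (months-per-period + last-day array)
-- instead of A's hardcoded table of date-suffix strings; objective: simpler.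

-- ===== PORT A =====
def pvFrequenciesA : PySem.Dict String (List (String × String)) :=
  PySem.Dict.ofList [
    ("monthly", [("-01-01", "-01-31"), ("-02-01", "-02-28"), ("-03-01", "-03-31"), ("-04-01", "-04-30"),
                 ("-05-01", "-05-31"), ("-06-01", "-06-30"), ("-07-01", "-07-31"), ("-08-01", "-08-31"),
                 ("-09-01", "-09-30"), ("-10-01", "-10-31"), ("-11-01", "-11-30"), ("-12-01", "-12-31")]),
    ("bimonthly", [("-01-01", "-02-28"), ("-03-01", "-04-30"), ("-05-01", "-06-30"), ("-07-01", "-08-31"),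
                   ("-09-01", "-10-31"), ("-11-01", "-12-31")]),
    ("quarterly", [("-01-01", "-03-31"), ("-04-01", "-06-30"), ("-07-01", "-09-30"), ("-10-01", "-12-31")]),
    ("four_months", [("-01-01", "-04-30"), ("-05-01", "-08-31"), ("-09-01", "-12-31")]),
    ("six_months", [("-01-01", "-06-30"), ("-07-01", "-12-31")])]

-- frequencies[frequency] raises KeyError when the key is absent: excluded by Pre_, so getD's default is never used there
def generate_date_ranges (start_year : Int) (end_year : Int) (frequency : String) : List (String × String) :=
  (PySem.List.pyRange start_year (end_year + 1) 1).flatMap (fun year =>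
    (PySem.Dict.getD pvFrequenciesA frequency []).map (fun se =>
      (PySem.Int.toStr year ++ se.1, PySem.Int.toStr year ++ se.2)))

-- ===== PORT B =====
-- f"{n:02d}" for 0 ≤ n ≤ 99 (the only uses here): zero-pad to two digits
def pvPad2 (n : Int) : String := if n < 10 then "0" ++ PySem.Int.toStr n else PySem.Int.toStr n

def pvSteps : PySem.Dict String Int :=
  PySem.Dict.ofList [("monthly", 1), ("bimonthly", 2), ("quarterly", 3), ("four_months", 4), ("six_months", 6)]

def pvLastDay : List Int := [31, 28, 31, 30, 31, 30, 31, 31, 30, 31, 30, 31]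

-- the dict lookup raises KeyError for unknown frequency (excluded by Pre_; default 1 unused there);
-- last_day[j] is always in range under Pre_, so the getD default is unused too
def generate_date_ranges_alt (start_year : Int) (end_year : Int) (frequency : String) : List (String × String) :=
  if end_year < start_year then [] else
  let step := PySem.Dict.getD pvSteps frequency 1
  (PySem.List.pyRange start_year (end_year + 1) 1).flatMap (fun year =>
    (PySem.List.pyRange 0 12 step).flatMap (fun i =>
      let j := i + step - 1
      [(PySem.Int.toStr year ++ "-" ++ pvPad2 (i + 1) ++ "-01",
        PySem.Int.toStr year ++ "-" ++ pvPad2 (j + 1) ++ "-" ++ pvPad2 (PySem.List.pyGetD pvLastDay j 0))]))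

-- ===== PRECONDITION & SPEC =====
-- Pre_: either the year range is empty (A returns [] without touching the table) or the frequency
-- is one of the five table keys; a nonempty range with any other frequency makes A raise KeyError.
def Pre_generate_date_ranges (start_year : Int) (end_year : Int) (frequency : String) : Prop :=
  end_year < start_year ∨ frequency = "monthly" ∨ frequency = "bimonthly" ∨ frequency = "quarterly" ∨
  frequency = "four_months" ∨ frequency = "six_months"
instance (start_year : Int) (end_year : Int) (frequency : String) : Decidable (Pre_generate_date_ranges start_year end_year frequency) := by unfold Pre_generate_date_ranges; infer_instance
def pvWitness_generate_date_ranges : Int × Int × String := (2020, 2022, "quarterly")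

def Spec_generate_date_ranges (start_year : Int) (end_year : Int) (frequency : String) (out : List (String × String)) : Prop := out = generate_date_ranges_alt start_year end_year frequency
instance (start_year : Int) (end_year : Int) (frequency : String) (out : List (String × String)) : Decidable (Spec_generate_date_ranges start_year end_year frequency out) := by unfold Spec_generate_date_ranges; infer_instance

-- ===== CLAIM (what is proved, stated in full; the proofs are below) =====
def Claim_equal_generate_date_ranges : Prop := ∀ (start_year : Int) (end_year : Int) (frequency : String), Dom_generate_date_ranges start_year end_year frequency → Pre_generate_date_ranges start_year end_year frequency → Spec_generate_date_ranges start_year end_year frequency (generate_date_ranges start_year end_year frequency)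

-- ===== LEMMAS AND PROOFS =====
theorem pv_inner_eq (f : String) (hf : f = "monthly" ∨ f = "bimonthly" ∨ f = "quarterly" ∨
    f = "four_months" ∨ f = "six_months") (y : Int) :
    (PySem.Dict.getD pvFrequenciesA f []).map (fun se =>
      (PySem.Int.toStr y ++ se.1, PySem.Int.toStr y ++ se.2)) =
    (PySem.List.pyRange 0 12 (PySem.Dict.getD pvSteps f 1)).flatMap (fun i =>
      let j := i + (PySem.Dict.getD pvSteps f 1) - 1
      [(PySem.Int.toStr y ++ "-" ++ pvPad2 (i + 1) ++ "-01",
        PySem.Int.toStr y ++ "-" ++ pvPad2 (j + 1) ++ "-" ++ pvPad2 (PySem.List.pyGetD pvLastDay j 0))]) := by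
  rcases hf with h | h | h | h | h <;> subst h <;>
    simp [pvFrequenciesA, pvSteps, pvLastDay, pvPad2, String.append_assoc] <;> rfl

theorem generate_date_ranges_eq (sy ey : Int) (f : String)
    (hf : Pre_generate_date_ranges sy ey f) :
    generate_date_ranges sy ey f = generate_date_ranges_alt sy ey f := by
  unfold generate_date_ranges generate_date_ranges_alt
  by_cases hlt : ey < sy
  · simp [hlt, PySem.List.pyRange_one_eq_nil (by omega : ey + 1 ≤ sy)]
  · rcases hf with h | hf
    · exact absurd h hlt
    · simp only [if_neg hlt]
      exact List.flatMap_congr (fun y _ => pv_inner_eq f hf y)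

-- ===== VERDICT (by name: the statement is the Claim_ definition above) =====
theorem generate_date_ranges_spec : Claim_equal_generate_date_ranges := by
  intro sy ey f _ hpre
  exact generate_date_ranges_eq sy ey f hpre
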